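-- pv_equiv track=rewrite | github.com/MrBrantCode/unitest_baseline | mut_generate/mist_train_cf/cf_58035/solution.py | improved_simplify
-- ===== SOURCE A (Python) =====
-- import math
--
-- def improved_simplify(x, y):
--     # Validate x and y.
--     for z in [x, y]:
--         if '/' not in z:
--             return 'Input must be a fraction.'
--         parts = z.split('/')
--         if len(parts) != 2 or not parts[0].isdigit() or not parts[1].isdigit() or int(parts[1]) == 0:
--             return 'Input must be a valid fraction.'
--
--     # Split the numerators and denominators.
--     x_num, x_den = map(int, x.split('/'))
--     y_num, y_den = map(int, y.split('/'))
--
--     # Multiply numerators and denominators.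
--     num = x_num * y_num
--     den = x_den * y_den
--
--     # Find the greatest common divisor.
--     gcd = math.gcd(num, den)
--
--     # Divide the numerator and denominator by the GCD until they are co-prime.
--     while gcd != 1:
--         num //= gcd
--         den //= gcd
--         gcd = math.gcd(num, den)
--
--     return f"{num}/{den}"
-- ===== SOURCE B (Python) =====
-- import math
--
-- def _parse_reduced(z):
--     # Returns an error string, or the fraction reduced to lowest terms as a pair.
--     if '/' not in z:
--         return 'Input must be a fraction.'
--     parts = z.split('/')
--     if len(parts) != 2 or not parts[0].isdigit() or not parts[1].isdigit() or int(parts[1]) == 0: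
--         return 'Input must be a valid fraction.'
--     n, d = int(parts[0]), int(parts[1])
--     g = math.gcd(n, d)
--     return n // g, d // g
--
-- def improved_simplify(x, y):
--     fx = _parse_reduced(x)
--     if isinstance(fx, str):
--         return fx
--     fy = _parse_reduced(y)
--     if isinstance(fy, str):
--         return fy
--     a, b = fx
--     c, d = fy
--     # Cross-cancellation: both operands are already in lowest terms.
--     g1 = math.gcd(a, d)
--     g2 = math.gcd(c, b)
--     return f"{(a // g1) * (c // g2)}/{(d // g1) * (b // g2)}"
-- ===== Notes on version B (the rewrite author's own statement) =====
-- stated objective: alternative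
-- what changed: Instead of multiplying numerators/denominators first and then reducing the product with a gcd loop, B reduces each input fraction by its own gcd and cross-cancels (gcd of each numerator with the opposite denominator) before multiplying, so the gcds and products are taken on smaller operands.
import Mathlib
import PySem

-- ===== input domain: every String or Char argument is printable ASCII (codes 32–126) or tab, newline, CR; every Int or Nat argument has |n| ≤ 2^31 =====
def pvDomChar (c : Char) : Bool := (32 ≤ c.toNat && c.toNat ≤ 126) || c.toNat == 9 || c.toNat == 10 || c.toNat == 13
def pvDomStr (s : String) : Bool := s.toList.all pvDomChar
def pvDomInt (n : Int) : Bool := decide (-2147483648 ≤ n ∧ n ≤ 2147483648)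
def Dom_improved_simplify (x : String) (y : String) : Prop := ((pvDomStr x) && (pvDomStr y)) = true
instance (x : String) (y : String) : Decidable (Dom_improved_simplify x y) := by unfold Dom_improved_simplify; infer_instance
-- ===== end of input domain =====

-- B multiplies two fractions by reducing each operand first and cross-cancelling
-- (gcd of each numerator with the opposite denominator), instead of A's
-- multiply-first-then-reduce-by-gcd loop; same return value, smaller intermediate numbers.

-- int(s) as used by both programs on inputs where Python's int() cannot fail
-- (the validation has already checked the string is all digits).
def pvInt (s : String) : Int := (PySem.Int.ofStr? s).getD 0

-- ===== PORT A =====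

-- the body of A's validation 'for z in [x, y]' loop: some errmsg = early return
def improved_simplify_validate (z : String) : Option String :=
  if PySem.Str.isIn "/" z = false then
    some "Input must be a fraction."
  else
    let parts := (PySem.Str.split? z "/").getD []
    if parts.length ≠ 2 ∨
        PySem.Str.strIsdigit (PySem.List.pyGetD parts 0 "") = false ∨
        PySem.Str.strIsdigit (PySem.List.pyGetD parts 1 "") = false ∨
        pvInt (PySem.List.pyGetD parts 1 "") = 0 then
      some "Input must be a valid fraction."
    else
      none

-- A's 'while gcd != 1' loop; the '0 < den' conjunct only makes the recursion total
-- (after A's validation den is always positive, so it never changes the result there).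
def improved_simplify_loop (num den : Int) : Int × Int :=
  if h : (Int.gcd num den : Int) ≠ 1 ∧ 0 < den then
    improved_simplify_loop (PySem.Int.floordiv num (Int.gcd num den : Int))
      (PySem.Int.floordiv den (Int.gcd num den : Int))
  else
    (num, den)
termination_by den.toNat
decreasing_by
  obtain ⟨hg1, hden⟩ := h
  have hgpos : 0 < Int.gcd num den := Int.gcd_pos_iff.mpr (Or.inr (by omega))
  have hg2 : (2 : Int) ≤ (Int.gcd num den : Int) := by
    have : Int.gcd num den ≠ 1 := fun hc => hg1 (by rw [hc]; rfl)
    omega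
  have : PySem.Int.floordiv den (Int.gcd num den : Int) < den := by
    rw [PySem.Int.floordiv_eq_ediv_of_pos (by omega)]
    exact Int.ediv_lt_of_lt_mul (by omega) (by nlinarith)
  omega

def improved_simplify (x : String) (y : String) : String :=
  match improved_simplify_validate x with
  | some err => err
  | none =>
    match improved_simplify_validate y with
    | some err => err
    | none =>
      let xparts := (PySem.Str.split? x "/").getD []
      let yparts := (PySem.Str.split? y "/").getD []
      let x_num := pvInt (PySem.List.pyGetD xparts 0 "")
      let x_den := pvInt (PySem.List.pyGetD xparts 1 "")
      let y_num := pvInt (PySem.List.pyGetD yparts 0 "")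
      let y_den := pvInt (PySem.List.pyGetD yparts 1 "")
      let num := x_num * y_num
      let den := x_den * y_den
      let nd := improved_simplify_loop num den
      PySem.Int.toStr nd.1 ++ "/" ++ PySem.Int.toStr nd.2

-- ===== PORT B =====

-- Source B _parse_reduced: n // g, d // g for g = gcd(n, d)
def improved_simplify_alt_reduce (n : Int) (d : Int) : Int × Int :=
  let g : Int := (Int.gcd n d : Int)
  (PySem.Int.floordiv n g, PySem.Int.floordiv d g)

-- Source B _parse_reduced: an error string, or the fraction in lowest terms
def improved_simplify_alt_parse (z : String) : String ⊕ (Int × Int) :=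
  if PySem.Str.isIn "/" z = false then
    .inl "Input must be a fraction."
  else
    let parts := (PySem.Str.split? z "/").getD []
    if parts.length ≠ 2 ∨
        PySem.Str.strIsdigit (PySem.List.pyGetD parts 0 "") = false ∨
        PySem.Str.strIsdigit (PySem.List.pyGetD parts 1 "") = false ∨
        pvInt (PySem.List.pyGetD parts 1 "") = 0 then
      .inl "Input must be a valid fraction."
    else
      .inr (improved_simplify_alt_reduce (pvInt (PySem.List.pyGetD parts 0 ""))
              (pvInt (PySem.List.pyGetD parts 1 "")))

def improved_simplify_alt (x : String) (y : String) : String :=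
  match improved_simplify_alt_parse x with
  | .inl err => err
  | .inr (a, b) =>
    match improved_simplify_alt_parse y with
    | .inl err => err
    | .inr (c, d) =>
      let g1 : Int := (Int.gcd a d : Int)
      let g2 : Int := (Int.gcd c b : Int)
      PySem.Int.toStr (PySem.Int.floordiv a g1 * PySem.Int.floordiv c g2) ++ "/" ++
        PySem.Int.toStr (PySem.Int.floordiv d g1 * PySem.Int.floordiv b g2)

-- ===== PRECONDITION & SPEC =====
def Spec_improved_simplify (x : String) (y : String) (out : String) : Prop := out = improved_simplify_alt x y
instance (x : String) (y : String) (out : String) : Decidable (Spec_improved_simplify x y out) := by unfold Spec_improved_simplify; infer_instance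

-- ===== CLAIM (what is proved, stated in full; the proofs are below) =====
def Claim_equal_improved_simplify : Prop := ∀ (x : String) (y : String), Dom_improved_simplify x y → Spec_improved_simplify x y (improved_simplify x y)

-- ===== LEMMAS AND PROOFS =====

theorem pv_digit_not_space (c : Char) (h : PySem.Chars.isdigit c = true) :
    PySem.Int.isIntSpace c = false := by
  simp only [PySem.Chars.isdigit, Bool.and_eq_true, decide_eq_true_eq] at h
  simp only [PySem.Int.isIntSpace, Bool.or_eq_false_iff, decide_eq_false_iff_not]
  obtain ⟨h1, h2⟩ := h
  refine ⟨⟨⟨⟨⟨?_, ?_⟩, ?_⟩, ?_⟩, ?_⟩, ?_⟩ <;> rintro rfl <;> revert h1 h2 <;> decide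

theorem pv_shape_nonneg (o : Option ℕ) :
    0 ≤ (Option.map (fun n : ℤ => n) (o.bind fun a => pure ((a : ℕ) : ℤ))).getD 0 := by
  cases o <;> simp

theorem pv_ofChars_nonneg (l : List Char) (hne : l ≠ [])
    (hall : ∀ c ∈ l, PySem.Chars.isdigit c = true) :
    0 ≤ (PySem.Int.ofChars? l).getD 0 := by
  have hnospace : ∀ l' : List Char, (∀ c ∈ l', PySem.Chars.isdigit c = true) →
      List.dropWhile PySem.Int.isIntSpace l' = l' := by
    intro l' hl
    cases l' with
    | nil => rfl
    | cons c t => rw [List.dropWhile_cons_of_neg (by simp [pv_digit_not_space c (hl c (by simp))])]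
  unfold PySem.Int.ofChars?
  rw [hnospace _ hall]
  rw [hnospace _ (by intro c hc; exact hall c (List.mem_reverse.mp hc)), List.reverse_reverse]
  cases l with
  | nil => exact absurd rfl hne
  | cons c t =>
    have hc : PySem.Chars.isdigit c = true := hall c (by simp)
    dsimp only
    split
    · rename_i ds hds
      exfalso
      injection hds with h1 _
      subst h1; revert hc; decide
    · rename_i ds hds
      exfalso
      injection hds with h1 _
      subst h1; revert hc; decide
    · exact pv_shape_nonneg _

-- the validated strings are all digits, so int() returns a nonnegative value
theorem pv_pvInt_nonneg (s : String) (h : PySem.Str.strIsdigit s = true) : 0 ≤ pvInt s := by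
  have h' : PySem.Chars.strIsdigit s.toList = true := by
    rw [← PySem.Str.strIsdigit_eq]; exact h
  simp only [PySem.Chars.strIsdigit, Bool.and_eq_true, Bool.not_eq_true',
    List.isEmpty_eq_false_iff, List.all_eq_true] at h'
  exact pv_ofChars_nonneg s.toList h'.1 h'.2

-- A's while loop runs exactly one division round (the second gcd is always 1)
theorem pv_loop_eq (m k : ℕ) (hk : 0 < k) :
    improved_simplify_loop (m : Int) (k : Int) =
      (((m / m.gcd k : ℕ) : Int), ((k / m.gcd k : ℕ) : Int)) := by
  have hgc : Int.gcd (m : Int) (k : Int) = m.gcd k := Int.gcd_natCast_natCast m k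
  rw [improved_simplify_loop]
  by_cases hg : m.gcd k = 1
  · rw [dif_neg (by simp [hgc, hg])]
    simp [hg]
  · have hgp : 0 < m.gcd k := Nat.gcd_pos_of_pos_right m hk
    rw [dif_pos ⟨by simp [hgc]; exact_mod_cast hg, by exact_mod_cast hk⟩]
    rw [hgc]
    rw [PySem.Int.floordiv_natCast, PySem.Int.floordiv_natCast]
    rw [improved_simplify_loop]
    have hcop : (m / m.gcd k).gcd (k / m.gcd k) = 1 := Nat.coprime_div_gcd_div_gcd hgp
    rw [dif_neg (fun hC => hC.1 (by rw [Int.gcd_natCast_natCast, hcop]; rfl))]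

theorem pv_reduce_eq (n k : ℕ) :
    improved_simplify_alt_reduce (n : Int) (k : Int) =
      (((n / n.gcd k : ℕ) : Int), ((k / n.gcd k : ℕ) : Int)) := by
  simp [improved_simplify_alt_reduce, Int.gcd_natCast_natCast]

theorem pv_reduced_unique (n1 d1 n2 d2 : ℕ) (h1 : 0 < d1) (h2 : 0 < d2)
    (c1 : Nat.Coprime n1 d1) (c2 : Nat.Coprime n2 d2) (hx : n1 * d2 = n2 * d1) :
    n1 = n2 ∧ d1 = d2 := by
  have hd12 : d1 = d2 := by
    apply Nat.dvd_antisymm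
    · exact (Nat.Coprime.dvd_of_dvd_mul_left c1.symm) ⟨n2, by rw [hx, Nat.mul_comm]⟩
    · exact (Nat.Coprime.dvd_of_dvd_mul_left c2.symm) ⟨n1, by rw [← hx, Nat.mul_comm]⟩
  subst hd12
  exact ⟨Nat.eq_of_mul_eq_mul_right h1 hx, rfl⟩

-- the arithmetic core: multiply-then-reduce equals reduce-operands-then-cross-cancel
theorem pv_cross_cancel (a b c d : ℕ) (hb : 0 < b) (hd : 0 < d) :
    (a * c) / ((a * c).gcd (b * d)) =
      (a / a.gcd b) / ((a / a.gcd b).gcd (d / c.gcd d)) *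
        ((c / c.gcd d) / ((c / c.gcd d).gcd (b / a.gcd b))) ∧
    (b * d) / ((a * c).gcd (b * d)) =
      (d / c.gcd d) / ((a / a.gcd b).gcd (d / c.gcd d)) *
        ((b / a.gcd b) / ((c / c.gcd d).gcd (b / a.gcd b))) := by
  set gx := a.gcd b with hgx
  set gy := c.gcd d with hgy
  set a' := a / gx with ha'
  set b' := b / gx with hb'
  set c' := c / gy with hc'
  set d' := d / gy with hd'
  set g1 := a'.gcd d' with hg1
  set g2 := c'.gcd b' with hg2
  set A1 := a' / g1 with hA1
  set D1 := d' / g1 with hD1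
  set C1 := c' / g2 with hC1
  set B1 := b' / g2 with hB1
  set G := (a * c).gcd (b * d) with hG
  have hgxp : 0 < gx := Nat.gcd_pos_of_pos_right a hb
  have hgyp : 0 < gy := Nat.gcd_pos_of_pos_right c hd
  have hb'p : 0 < b' := Nat.div_pos (Nat.le_of_dvd hb (Nat.gcd_dvd_right a b)) hgxp
  have hd'p : 0 < d' := Nat.div_pos (Nat.le_of_dvd hd (Nat.gcd_dvd_right c d)) hgyp
  have hg1p : 0 < g1 := Nat.gcd_pos_of_pos_right a' hd'p
  have hg2p : 0 < g2 := Nat.gcd_pos_of_pos_right c' hb'p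
  have hD1p : 0 < D1 := Nat.div_pos (Nat.le_of_dvd hd'p (Nat.gcd_dvd_right a' d')) hg1p
  have hB1p : 0 < B1 := Nat.div_pos (Nat.le_of_dvd hb'p (Nat.gcd_dvd_right c' b')) hg2p
  have hbd : 0 < b * d := Nat.mul_pos hb hd
  have hGp : 0 < G := Nat.gcd_pos_of_pos_right (a * c) hbd
  have hd1p : 0 < (b * d) / G := Nat.div_pos (Nat.le_of_dvd hbd (Nat.gcd_dvd_right _ _)) hGp
  have ea : a' * gx = a := Nat.div_mul_cancel (Nat.gcd_dvd_left a b)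
  have eb : b' * gx = b := Nat.div_mul_cancel (Nat.gcd_dvd_right a b)
  have ec : c' * gy = c := Nat.div_mul_cancel (Nat.gcd_dvd_left c d)
  have ed : d' * gy = d := Nat.div_mul_cancel (Nat.gcd_dvd_right c d)
  have eA : A1 * g1 = a' := Nat.div_mul_cancel (Nat.gcd_dvd_left a' d')
  have eD : D1 * g1 = d' := Nat.div_mul_cancel (Nat.gcd_dvd_right a' d')
  have eC : C1 * g2 = c' := Nat.div_mul_cancel (Nat.gcd_dvd_left c' b')
  have eB : B1 * g2 = b' := Nat.div_mul_cancel (Nat.gcd_dvd_right c' b')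
  have en : (a * c) / G * G = a * c := Nat.div_mul_cancel (Nat.gcd_dvd_left _ _)
  have eDen : (b * d) / G * G = b * d := Nat.div_mul_cancel (Nat.gcd_dvd_right _ _)
  have cop_ab : Nat.Coprime a' b' := Nat.coprime_div_gcd_div_gcd hgxp
  have cop_cd : Nat.Coprime c' d' := Nat.coprime_div_gcd_div_gcd hgyp
  have cA1D1 : Nat.Coprime A1 D1 := Nat.coprime_div_gcd_div_gcd hg1p
  have cC1B1 : Nat.Coprime C1 B1 := Nat.coprime_div_gcd_div_gcd hg2p
  have dA1 : A1 ∣ a' := ⟨g1, eA.symm⟩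
  have dB1 : B1 ∣ b' := ⟨g2, eB.symm⟩
  have dC1 : C1 ∣ c' := ⟨g2, eC.symm⟩
  have dD1 : D1 ∣ d' := ⟨g1, eD.symm⟩
  have cA1B1 : Nat.Coprime A1 B1 :=
    Nat.Coprime.coprime_dvd_left dA1 (Nat.Coprime.coprime_dvd_right dB1 cop_ab)
  have cC1D1 : Nat.Coprime C1 D1 :=
    Nat.Coprime.coprime_dvd_left dC1 (Nat.Coprime.coprime_dvd_right dD1 cop_cd)
  have c2 : Nat.Coprime (A1 * C1) (D1 * B1) :=
    Nat.Coprime.mul_left (Nat.Coprime.mul_right cA1D1 cA1B1) (Nat.Coprime.mul_right cC1D1 cC1B1)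
  have c1 : Nat.Coprime ((a * c) / G) ((b * d) / G) := Nat.coprime_div_gcd_div_gcd hGp
  have hx : (a * c) / G * (D1 * B1) = (A1 * C1) * ((b * d) / G) := by
    apply Nat.eq_of_mul_eq_mul_right hGp
    have lhs : (a * c) / G * (D1 * B1) * G = (a * c) * (D1 * B1) := by
      calc (a * c) / G * (D1 * B1) * G = ((a * c) / G * G) * (D1 * B1) := by ring
        _ = (a * c) * (D1 * B1) := by rw [en]
    have rhs : (A1 * C1) * ((b * d) / G) * G = (A1 * C1) * (b * d) := by
      calc (A1 * C1) * ((b * d) / G) * G = ((b * d) / G * G) * (A1 * C1) := by ring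
        _ = (A1 * C1) * (b * d) := by rw [eDen]; ring
    rw [lhs, rhs, ← ea, ← eb, ← ec, ← ed, ← eA, ← eB, ← eC, ← eD]
    ring
  have hD2p : 0 < D1 * B1 := Nat.mul_pos hD1p hB1p
  exact pv_reduced_unique _ _ _ _ hd1p hD2p c1 c2 hx

theorem pv_parse_some (z : String) (e : String) (h : improved_simplify_validate z = some e) :
    improved_simplify_alt_parse z = .inl e := by
  unfold improved_simplify_validate at h
  unfold improved_simplify_alt_parse
  split at h <;> rename_i h1
  · simp_all
  · rw [if_neg h1]
    dsimp only at h ⊢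
    split at h <;> rename_i h2
    · rw [if_pos h2]; simp_all
    · cases h

theorem pv_parse_none (z : String) (h : improved_simplify_validate z = none) :
    improved_simplify_alt_parse z =
      .inr (improved_simplify_alt_reduce
        (pvInt (PySem.List.pyGetD ((PySem.Str.split? z "/").getD []) 0 ""))
        (pvInt (PySem.List.pyGetD ((PySem.Str.split? z "/").getD []) 1 ""))) := by
  unfold improved_simplify_validate at h
  unfold improved_simplify_alt_parse
  split at h <;> rename_i h1
  · simp_all
  · rw [if_neg h1]
    dsimp only at h ⊢
    split at h <;> rename_i h2
    · rw [if_pos h2]; simp_all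
    · rw [if_neg h2]

theorem pv_validate_none (z : String) (h : improved_simplify_validate z = none) :
    PySem.Str.strIsdigit (PySem.List.pyGetD ((PySem.Str.split? z "/").getD []) 0 "") = true ∧
    PySem.Str.strIsdigit (PySem.List.pyGetD ((PySem.Str.split? z "/").getD []) 1 "") = true ∧
    pvInt (PySem.List.pyGetD ((PySem.Str.split? z "/").getD []) 1 "") ≠ 0 := by
  unfold improved_simplify_validate at h
  split at h
  · cases h
  · dsimp only at h
    split at h
    · cases h
    · rename_i h1 h2
      push Not at h2
      exact ⟨by simpa using h2.2.1, by simpa using h2.2.2.1, h2.2.2.2⟩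

-- ===== VERDICT (by name: the statement is the Claim_ definition above) =====
theorem improved_simplify_spec : Claim_equal_improved_simplify := by
  intro x y _
  unfold Spec_improved_simplify improved_simplify improved_simplify_alt
  cases hvx : improved_simplify_validate x with
  | some e => rw [pv_parse_some x e hvx]
  | none =>
    cases hvy : improved_simplify_validate y with
    | some e =>
      rw [pv_parse_none x hvx, pv_parse_some y e hvy]
    | none =>
      obtain ⟨hdx0, hdx1, hzx⟩ := pv_validate_none x hvx
      obtain ⟨hdy0, hdy1, hzy⟩ := pv_validate_none y hvy
      obtain ⟨na, hna⟩ : ∃ n : ℕ,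
          pvInt (PySem.List.pyGetD ((PySem.Str.split? x "/").getD []) 0 "") = (n : Int) :=
        ⟨_, (Int.toNat_of_nonneg (pv_pvInt_nonneg _ hdx0)).symm⟩
      obtain ⟨nb, hnb⟩ : ∃ n : ℕ,
          pvInt (PySem.List.pyGetD ((PySem.Str.split? x "/").getD []) 1 "") = (n : Int) :=
        ⟨_, (Int.toNat_of_nonneg (pv_pvInt_nonneg _ hdx1)).symm⟩
      obtain ⟨nc, hnc⟩ : ∃ n : ℕ,
          pvInt (PySem.List.pyGetD ((PySem.Str.split? y "/").getD []) 0 "") = (n : Int) :=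
        ⟨_, (Int.toNat_of_nonneg (pv_pvInt_nonneg _ hdy0)).symm⟩
      obtain ⟨nd, hnd⟩ : ∃ n : ℕ,
          pvInt (PySem.List.pyGetD ((PySem.Str.split? y "/").getD []) 1 "") = (n : Int) :=
        ⟨_, (Int.toNat_of_nonneg (pv_pvInt_nonneg _ hdy1)).symm⟩
      have hbp : 0 < nb := by
        rcases Nat.eq_zero_or_pos nb with h0 | h0
        · exact absurd (by rw [hnb, h0]; rfl) hzx
        · exact h0
      have hdp : 0 < nd := by
        rcases Nat.eq_zero_or_pos nd with h0 | h0
        · exact absurd (by rw [hnd, h0]; rfl) hzy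
        · exact h0
      rw [pv_parse_none x hvx, pv_parse_none y hvy, hna, hnb, hnc, hnd,
        pv_reduce_eq na nb, pv_reduce_eq nc nd]
      dsimp only
      rw [hna, hnb, hnc, hnd]
      rw [← Nat.cast_mul, ← Nat.cast_mul, pv_loop_eq (na * nc) (nb * nd) (Nat.mul_pos hbp hdp)]
      dsimp only
      rw [Int.gcd_natCast_natCast, Int.gcd_natCast_natCast,
        PySem.Int.floordiv_natCast, PySem.Int.floordiv_natCast,
        PySem.Int.floordiv_natCast, PySem.Int.floordiv_natCast]
      obtain ⟨e1, e2⟩ := pv_cross_cancel na nb nc nd hbp hdp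
      rw [← Nat.cast_mul, ← Nat.cast_mul, e1, e2]
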